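-- pv_equiv track=rewrite | github.com/Stillssi/codingTest | 1.py | solution
-- ===== SOURCE A (Python) =====
-- def solution(price, money, count):
--     cnt =0
--     for i in range(1,count+1,1):
--         cnt += price * i
--
--     if money-cnt > 0:
--         return 0
--     else:
--         return cnt-money
-- ===== SOURCE B (Python) =====
-- def solution(price, money, count):
--     total = price * count * (count + 1) // 2 if count > 0 else 0
--     return max(0, total - money)
-- ===== Notes on version B (the rewrite author's own statement) =====
-- stated objective: faster
-- what changed: Replaces the O(count) accumulation loop by the closed-form arithmetic-series formula price*count*(count+1)//2 and expresses the shortfall as max(0, total-money).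
import Mathlib
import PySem

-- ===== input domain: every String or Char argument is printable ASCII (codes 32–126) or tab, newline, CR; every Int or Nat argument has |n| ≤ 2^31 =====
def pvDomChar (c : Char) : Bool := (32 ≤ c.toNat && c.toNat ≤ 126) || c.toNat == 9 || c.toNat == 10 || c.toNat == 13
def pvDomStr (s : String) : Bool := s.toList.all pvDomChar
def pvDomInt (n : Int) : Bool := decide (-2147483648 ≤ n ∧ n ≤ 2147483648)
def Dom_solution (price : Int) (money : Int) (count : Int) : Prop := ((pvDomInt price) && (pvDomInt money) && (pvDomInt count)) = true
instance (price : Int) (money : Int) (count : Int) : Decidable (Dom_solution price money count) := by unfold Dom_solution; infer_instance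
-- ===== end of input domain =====

-- B replaces A's O(count) accumulation loop by the closed-form series formula (asymptotically faster).

-- ===== PORT A =====
def solution (price : Int) (money : Int) (count : Int) : Int :=
  let cnt := (PySem.List.pyRange 1 (count + 1) 1).foldl (fun c i => c + price * i) 0
  if money - cnt > 0 then 0 else cnt - money

-- ===== PORT B =====
def solution_alt (price : Int) (money : Int) (count : Int) : Int :=
  let total := if count > 0 then PySem.Int.floordiv (price * count * (count + 1)) 2 else 0
  max 0 (total - money)

-- ===== PRECONDITION & SPEC =====
def Spec_solution (price : Int) (money : Int) (count : Int) (out : Int) : Prop := out = solution_alt price money count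
instance (price : Int) (money : Int) (count : Int) (out : Int) : Decidable (Spec_solution price money count out) := by unfold Spec_solution; infer_instance

-- ===== CLAIM (what is proved, stated in full; the proofs are below) =====
def Claim_equal_solution : Prop := ∀ (price : Int) (money : Int) (count : Int), Dom_solution price money count → Spec_solution price money count (solution price money count)

-- ===== LEMMAS AND PROOFS =====

-- Loop characterisation: twice the accumulated sum is price * n * (n+1) (for the range 1..n).
theorem pv_loop_double (price : Int) (n : Nat) :
    2 * (PySem.List.pyRange 1 ((n : Int) + 1) 1).foldl (fun c i => c + price * i) 0
      = price * n * (n + 1) := by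
  induction n with
  | zero => simp [PySem.List.pyRange_one_eq_nil]
  | succ m ih =>
    have h : PySem.List.pyRange 1 ((m : Int) + 1 + 1) 1
        = PySem.List.pyRange 1 ((m : Int) + 1) 1 ++ [(m : Int) + 1] :=
      PySem.List.pyRange_one_succ_right (by omega)
    push_cast
    rw [show ((m : Int) + 1 + 1) = ((m : Int) + 1) + 1 by ring] at h ⊢
    rw [h, List.foldl_append]
    simp only [List.foldl_cons, List.foldl_nil]
    push_cast at ih
    linarith [ih]

theorem pv_loop_closed (price : Int) (count : Int) :
    (PySem.List.pyRange 1 (count + 1) 1).foldl (fun c i => c + price * i) 0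
      = if count > 0 then PySem.Int.floordiv (price * count * (count + 1)) 2 else 0 := by
  split_ifs with h
  · obtain ⟨n, rfl⟩ : ∃ n : Nat, (n : Int) = count :=
      ⟨count.toNat, by omega⟩
    have hd := pv_loop_double price n
    rw [PySem.Int.floordiv_eq_ediv_of_pos (by norm_num)]
    omega
  · rw [PySem.List.pyRange_one_eq_nil (by omega)]
    simp

-- ===== VERDICT (by name: the statement is the Claim_ definition above) =====
theorem solution_spec : Claim_equal_solution := by
  intro price money count _
  unfold Spec_solution solution solution_alt
  rw [pv_loop_closed]
  set t := if count > 0 then PySem.Int.floordiv (price * count * (count + 1)) 2 else 0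
  dsimp only
  omega
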